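-- pv_equiv track=rewrite | github.com/nehaprajapati123/HakerRank | sumOfRemainder.py | FindSumOfRemainders
-- ===== SOURCE A (Python) =====
-- def FindSumOfRemainders(n, div):
--   # write your code here
--
--     sum = 0
--     i = 1
--     while i <= n:
--         rem = i % div
--         sum = sum+rem
--         i = i+1
--     return sum
-- ===== SOURCE B (Python) =====
-- def FindSumOfRemainders(n, div):
--     # Closed form: n//|div| full cycles of remainders plus a partial triangular sum; O(1).
--     if n < 1:
--         return 0
--     m = abs(div)
--     q, r = divmod(n, m)
--     cycle = m * (m - 1) // 2
--     part = r * (r + 1) // 2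
--     if div < 0:
--         cycle = -cycle
--         part += r * div
--     return q * cycle + part
-- ===== Notes on version B (the rewrite author's own statement) =====
-- stated objective: faster
-- what changed: Replaced the O(n) remainder-accumulating while loop by an O(1) closed form: full cycles contribute n//|div| copies of the per-cycle remainder sum and the leftover contributes a triangular sum (with a sign correction for negative divisors).
import Mathlib
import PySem

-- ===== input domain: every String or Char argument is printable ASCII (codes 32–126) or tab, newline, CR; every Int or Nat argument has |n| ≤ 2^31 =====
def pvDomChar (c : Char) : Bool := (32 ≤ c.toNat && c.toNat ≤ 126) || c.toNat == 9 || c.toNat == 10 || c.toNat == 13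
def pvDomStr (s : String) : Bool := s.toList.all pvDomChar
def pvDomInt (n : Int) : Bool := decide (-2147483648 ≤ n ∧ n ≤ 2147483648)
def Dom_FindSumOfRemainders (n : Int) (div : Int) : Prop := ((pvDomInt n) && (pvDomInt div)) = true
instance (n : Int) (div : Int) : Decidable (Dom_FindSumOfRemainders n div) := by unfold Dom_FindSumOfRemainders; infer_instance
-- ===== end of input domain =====

-- B replaces A's O(n) remainder-accumulating loop by an O(1) closed form (full cycles + partial triangular sum).

-- ===== PORT A =====
-- the while loop: state (sum, i), one recursive call per iteration
def FSRloop (n : Int) (div : Int) (sum : Int) (i : Int) : Int :=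
  if i ≤ n then FSRloop n div (sum + PySem.Int.mod i div) (i + 1) else sum
termination_by (n + 1 - i).toNat
decreasing_by omega

def FindSumOfRemainders (n : Int) (div : Int) : Int :=
  FSRloop n div 0 1

-- ===== PORT B =====
def FindSumOfRemainders_alt (n : Int) (div : Int) : Int :=
  if n < 1 then 0
  else
    let m : Int := |div|
    let q : Int := PySem.Int.floordiv n m
    let r : Int := PySem.Int.mod n m
    let cycle : Int := PySem.Int.floordiv (m * (m - 1)) 2
    let part : Int := PySem.Int.floordiv (r * (r + 1)) 2
    if div < 0 then q * (-cycle) + (part + r * div)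
    else q * cycle + part

-- ===== PRECONDITION & SPEC =====
-- Pre_ excludes exactly the inputs where Python A raises ZeroDivisionError: div = 0 with the loop entered (n ≥ 1).
def Pre_FindSumOfRemainders (n : Int) (div : Int) : Prop := div ≠ 0 ∨ n < 1
instance (n : Int) (div : Int) : Decidable (Pre_FindSumOfRemainders n div) := by unfold Pre_FindSumOfRemainders; infer_instance
def pvWitness_FindSumOfRemainders : Int × Int := (10, 3)

def Spec_FindSumOfRemainders (n : Int) (div : Int) (out : Int) : Prop := out = FindSumOfRemainders_alt n div
instance (n : Int) (div : Int) (out : Int) : Decidable (Spec_FindSumOfRemainders n div out) := by unfold Spec_FindSumOfRemainders; infer_instance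

-- ===== CLAIM =====
def Claim_equal_FindSumOfRemainders : Prop := ∀ (n : Int) (div : Int), Dom_FindSumOfRemainders n div → Pre_FindSumOfRemainders n div → Spec_FindSumOfRemainders n div (FindSumOfRemainders n div)

-- ===== LEMMAS AND PROOFS =====

-- the closed form of B, without the n < 1 guard, as a function of the upper bound k
def pvG (div : Int) (k : Int) : Int :=
  let m : Int := |div|
  let q : Int := PySem.Int.floordiv k m
  let r : Int := PySem.Int.mod k m
  let cycle : Int := PySem.Int.floordiv (m * (m - 1)) 2
  let part : Int := PySem.Int.floordiv (r * (r + 1)) 2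
  if div < 0 then q * (-cycle) + (part + r * div)
  else q * cycle + part

lemma pvG_zero (div : Int) (hd : div ≠ 0) : pvG div 0 = 0 := by
  have hm : (0:Int) < |div| := abs_pos.mpr hd
  simp [pvG, PySem.Int.floordiv_eq_ediv_of_pos hm, PySem.Int.mod_eq_emod_of_pos hm]

lemma pvTri_step (r : Int) :
    PySem.Int.floordiv (r * (r + 1)) 2 = PySem.Int.floordiv ((r - 1) * r) 2 + r := by
  have h2 : (0:Int) < 2 := by norm_num
  rw [PySem.Int.floordiv_eq_ediv_of_pos h2, PySem.Int.floordiv_eq_ediv_of_pos h2]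
  have : r * (r + 1) = (r - 1) * r + r * 2 := by ring
  rw [this, Int.add_mul_ediv_right _ _ (by norm_num : (2:Int) ≠ 0)]

lemma pvTri_double (a : Int) :
    2 * PySem.Int.floordiv (a * (a + 1)) 2 = a * (a + 1) := by
  have h2 : (0:Int) < 2 := by norm_num
  rw [PySem.Int.floordiv_eq_ediv_of_pos h2]
  have h : (2:Int) ∣ a * (a + 1) := Int.even_mul_succ_self a |>.two_dvd
  rw [mul_comm]
  exact Int.ediv_mul_cancel h

-- step: pvG div k = pvG div (k-1) + (k % div)  for div ≠ 0
lemma pvG_step (div k : Int) (hd : div ≠ 0) :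
    pvG div k = pvG div (k - 1) + PySem.Int.mod k div := by
  set m : Int := |div| with hmdef
  have hm : (0:Int) < m := abs_pos.mpr hd
  set q : Int := PySem.Int.floordiv k m with hq
  set r : Int := PySem.Int.mod k m with hr
  set q' : Int := PySem.Int.floordiv (k - 1) m with hq'
  set r' : Int := PySem.Int.mod (k - 1) m with hr'
  have e1 : q * m + r = k := PySem.Int.floordiv_mul_add_mod k m
  have e2 : q' * m + r' = k - 1 := PySem.Int.floordiv_mul_add_mod (k - 1) m
  have hr0 : 0 ≤ r := PySem.Int.mod_nonneg k hm
  have hrm : r < m := PySem.Int.mod_lt k hm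
  have hr'0 : 0 ≤ r' := PySem.Int.mod_nonneg (k - 1) hm
  have hr'm : r' < m := PySem.Int.mod_lt (k - 1) hm
  by_cases hrpos : 1 ≤ r
  · -- no cycle boundary: q' = q, r' = r - 1
    have hq'eq : q' = q := by
      have : PySem.Int.floordiv (k - 1) m = q :=
        (PySem.Int.floordiv_eq_iff_of_pos hm).mpr ⟨by nlinarith, by nlinarith⟩
      simpa [hq'] using this
    have hr'eq : r' = r - 1 := by
      have := e2; rw [hq'eq] at this; linarith
    rcases lt_or_ge div 0 with hneg | hpos
    · -- div < 0: k % div = r + div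
      have hdm : div = -m := by rw [hmdef, abs_of_neg hneg]; ring
      have hmodk : PySem.Int.mod k div = r + div := by
        set q2 : Int := PySem.Int.floordiv k div with hq2
        set r2 : Int := PySem.Int.mod k div with hr2
        have e3 : q2 * div + r2 = k := PySem.Int.floordiv_mul_add_mod k div
        have hb := PySem.Int.mod_neg_bounds k hneg
        rw [← hr2] at hb
        rw [hdm] at e3
        set t : Int := q2 + q + 1 with ht
        have hmul : t * m = r2 - r + m := by rw [ht]; linear_combination e1 - e3
        have hbound1 : -m < t * m := by rw [hmul]; rw [hdm] at hb; linarith [hb.1]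
        have hbound2 : t * m < m := by rw [hmul]; linarith [hb.2]
        have ht0 : t = 0 := by
          rcases lt_trichotomy t 0 with h | h | h
          · exfalso
            have : t * m ≤ -1 * m := mul_le_mul_of_nonneg_right (by omega : t ≤ -1) hm.le
            linarith
          · exact h
          · exfalso
            have : 1 * m ≤ t * m := mul_le_mul_of_nonneg_right (by omega : 1 ≤ t) hm.le
            linarith
        rw [ht0] at hmul
        linarith
      simp only [pvG, ← hmdef, ← hq, ← hr, ← hq', ← hr', hq'eq, hr'eq, if_pos hneg, hmodk]
      rw [show (r - 1) * (r - 1 + 1) = (r - 1) * r by ring, pvTri_step r]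
      ring
    · -- div > 0: m = div, k % div = r
      have hmd : m = div := by rw [hmdef, abs_of_pos (by omega)]
      have hnot : ¬ div < 0 := by omega
      have hmodk : PySem.Int.mod k div = r := by rw [hr, hmd]
      simp only [pvG, ← hmdef, ← hq, ← hr, ← hq', ← hr', hq'eq, hr'eq, if_neg hnot, hmodk]
      rw [show (r - 1) * (r - 1 + 1) = (r - 1) * r by ring, pvTri_step r]
      ring
  · -- r = 0: cycle boundary, q' = q - 1, r' = m - 1
    have hr00 : r = 0 := by omega
    have hq'eq : q' = q - 1 := by
      have : PySem.Int.floordiv (k - 1) m = q - 1 :=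
        (PySem.Int.floordiv_eq_iff_of_pos hm).mpr ⟨by nlinarith, by nlinarith⟩
      simpa [hq'] using this
    have hr'eq : r' = m - 1 := by
      have := e2; rw [hq'eq] at this; nlinarith
    have hdvd : div ∣ k := by
      rcases lt_or_ge div 0 with hneg | hpos
      · have hdm : div = -m := by rw [hmdef, abs_of_neg hneg]; ring
        exact ⟨-q, by rw [hdm]; nlinarith⟩
      · have hmd : m = div := by rw [hmdef, abs_of_pos (by omega)]
        exact ⟨q, by rw [← hmd]; nlinarith⟩
    have hmodk : PySem.Int.mod k div = 0 := (PySem.Int.mod_eq_zero_iff_dvd k div).mpr hdvd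
    have hdouble : 2 * PySem.Int.floordiv (m * (m - 1)) 2 = m * (m - 1) := by
      have h := pvTri_double (m - 1)
      rw [show (m - 1) * (m - 1 + 1) = m * (m - 1) by ring] at h
      exact h
    have hz : PySem.Int.floordiv ((0:Int) * (0 + 1)) 2 = 0 := by decide
    rcases lt_or_ge div 0 with hneg | hpos
    · have hdm : div = -m := by rw [hmdef, abs_of_neg hneg]; ring
      simp only [pvG, ← hmdef, ← hq, ← hr, ← hq', ← hr', hq'eq, hr'eq, hr00, if_pos hneg, hmodk]
      rw [show (m - 1) * (m - 1 + 1) = m * (m - 1) by ring, hz, hdm]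
      linear_combination -hdouble
    · have hnot : ¬ div < 0 := by omega
      simp only [pvG, ← hmdef, ← hq, ← hr, ← hq', ← hr', hq'eq, hr'eq, hr00, if_neg hnot, hmodk]
      rw [show (m - 1) * (m - 1 + 1) = m * (m - 1) by ring, hz]
      ring

-- loop invariant: from state (sum, i) with 1 ≤ i ≤ n+1, the loop returns sum + (pvG n - pvG (i-1))
lemma FSRloop_eq (n div : Int) (hd : div ≠ 0) :
    ∀ i sum, 1 ≤ i → i ≤ n + 1 → FSRloop n div sum i = sum + (pvG div n - pvG div (i - 1)) := by
  intro i sum h1 h2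
  induction hfuel : (n + 1 - i).toNat generalizing i sum with
  | zero =>
      have hi : i = n + 1 := by omega
      rw [FSRloop, if_neg (by omega)]
      subst hi
      simp
  | succ f ih =>
      rw [FSRloop, if_pos (by omega : i ≤ n),
        ih (i + 1) (sum + PySem.Int.mod i div) (by omega) (by omega) (by omega)]
      have hstep := pvG_step div i hd
      have h2' : pvG div (i + 1 - 1) = pvG div (i - 1) + PySem.Int.mod i div := by
        simpa using hstep
      rw [h2']; ring

lemma alt_eq_pvG (n div : Int) (hn : ¬ n < 1) : FindSumOfRemainders_alt n div = pvG div n := by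
  simp [FindSumOfRemainders_alt, pvG, hn]

-- ===== VERDICT =====
theorem FindSumOfRemainders_spec : Claim_equal_FindSumOfRemainders := by
  unfold Claim_equal_FindSumOfRemainders
  intro n div _ hpre
  unfold Spec_FindSumOfRemainders FindSumOfRemainders
  by_cases hn : n < 1
  · rw [FSRloop, if_neg (by omega)]
    simp [FindSumOfRemainders_alt, hn]
  · have hd : div ≠ 0 := by
      rcases hpre with h | h
      · exact h
      · omega
    rw [FSRloop_eq n div hd 1 0 (by omega) (by omega), alt_eq_pvG n div hn]
    simp [pvG_zero div hd]
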